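-- pv_equiv track=rewrite | github.com/night-kriss/ipo-lr9 | collision/intersectionAreaMultiRect.py | intersectionAreaMultiRect
-- ===== SOURCE A (Python) =====
-- class RectCorrectError(Exception):
--     pass # Исключение для ошибок с множеством прямоугольников
--
-- def intersectionAreaMultiRect(rectangles):
--     if not rectangles:
--         return 0  # Если список пустой, пересечение = 0
--
--     for rect in rectangles:
--         (x1, y1), (x2, y2) = rect
--         if x1 >= x2 or y1 >= y2:
--             raise RectCorrectError(f"Некорректный прямоугольник: {rect}")
--
--     intersection = rectangles[0]  # Начинаем с первого прямоугольника
--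
--     # Поочередно пересекаем с каждым прямоугольником из списка
--     for rect in rectangles[1:]:
--         (x1, y1), (x2, y2) = intersection
--         (x3, y3), (x4, y4) = rect
--
--         # Границы пересечения
--         left = max(x1, x3)
--         bottom = max(y1, y3)
--         right = min(x2, x4)
--         top = min(y2, y4)
--
--         if left < right and bottom < top:
--             # Если есть пересечение, обновляем границы
--             intersection = [(left, bottom), (right, top)]
--         else:
--             return 0  # Если пересечения нет, возвращаем 0
--
--     # Вычисляем площадь
--     (x1, y1), (x2, y2) = intersection
--     return (x2 - x1) * (y2 - y1)
-- ===== SOURCE B (Python) =====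
-- class RectCorrectError(Exception):
--     pass
--
-- def intersectionAreaMultiRect(rectangles):
--     if not rectangles:
--         return 0
--
--     for rect in rectangles:
--         (x1, y1), (x2, y2) = rect
--         if x1 >= x2 or y1 >= y2:
--             raise RectCorrectError(f"Некорректный прямоугольник: {rect}")
--
--     # global extremes over the whole list, then one emptiness check
--     left = max(r[0][0] for r in rectangles)
--     bottom = max(r[0][1] for r in rectangles)
--     right = min(r[1][0] for r in rectangles)
--     top = min(r[1][1] for r in rectangles)
--
--     if left < right and bottom < top:
--         return (right - left) * (top - bottom)
--     return 0
-- ===== Notes on version B (the rewrite author's own statement) =====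
-- stated objective: simpler
-- what changed: Replaces the running-intersection fold with early return by four global max/min aggregates over the whole list and a single final emptiness check.
import Mathlib
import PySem

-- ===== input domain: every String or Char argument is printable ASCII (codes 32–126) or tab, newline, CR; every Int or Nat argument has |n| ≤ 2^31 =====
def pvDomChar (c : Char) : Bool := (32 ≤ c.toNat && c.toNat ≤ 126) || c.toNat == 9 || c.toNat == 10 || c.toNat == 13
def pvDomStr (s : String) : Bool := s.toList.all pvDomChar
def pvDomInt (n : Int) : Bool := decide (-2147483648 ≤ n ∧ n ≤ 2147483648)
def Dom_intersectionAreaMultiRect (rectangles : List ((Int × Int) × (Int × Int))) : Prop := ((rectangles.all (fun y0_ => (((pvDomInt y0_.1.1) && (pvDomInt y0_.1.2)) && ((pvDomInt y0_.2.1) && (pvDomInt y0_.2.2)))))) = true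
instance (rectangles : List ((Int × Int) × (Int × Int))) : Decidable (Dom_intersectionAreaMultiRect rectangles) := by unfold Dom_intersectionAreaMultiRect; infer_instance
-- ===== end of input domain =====

-- B replaces A's running-intersection fold (with early return) by four global
-- max/min aggregates and one final emptiness check; objective: simpler.

-- ===== PORT A =====
-- A's per-rectangle loop with early return: fold over rectangles[1:] carrying
-- the current intersection rectangle; returning 0 on an empty intersection.
-- (A's validation loop either raises — excluded by Pre_ — or does nothing.)
def iamrGoA : ((Int × Int) × (Int × Int)) → List ((Int × Int) × (Int × Int)) → Int
  | ((x1, y1), (x2, y2)), [] => (x2 - x1) * (y2 - y1)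
  | ((x1, y1), (x2, y2)), ((x3, y3), (x4, y4)) :: rest =>
    let left := max x1 x3
    let bottom := max y1 y3
    let right := min x2 x4
    let top := min y2 y4
    if left < right ∧ bottom < top then
      iamrGoA ((left, bottom), (right, top)) rest
    else
      0

def intersectionAreaMultiRect (rectangles : List ((Int × Int) × (Int × Int))) : Int :=
  match rectangles with
  | [] => 0
  | r :: rest => iamrGoA r rest

-- ===== PORT B =====
-- max(...)/min(...) over a nonempty list = foldl max/min of the head's value over the tail
def intersectionAreaMultiRect_alt (rectangles : List ((Int × Int) × (Int × Int))) : Int :=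
  match rectangles with
  | [] => 0
  | r :: rest =>
    let left := rest.foldl (fun a q => max a q.1.1) r.1.1
    let bottom := rest.foldl (fun a q => max a q.1.2) r.1.2
    let right := rest.foldl (fun a q => min a q.2.1) r.2.1
    let top := rest.foldl (fun a q => min a q.2.2) r.2.2
    if left < right ∧ bottom < top then (right - left) * (top - bottom) else 0

-- ===== PRECONDITION & SPEC =====
-- Pre_ excludes exactly the inputs where A raises RectCorrectError: some
-- rectangle with x1 >= x2 or y1 >= y2.
def Pre_intersectionAreaMultiRect (rectangles : List ((Int × Int) × (Int × Int))) : Prop :=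
  (rectangles.all (fun r => decide (r.1.1 < r.2.1) && decide (r.1.2 < r.2.2))) = true
instance (rectangles : List ((Int × Int) × (Int × Int))) : Decidable (Pre_intersectionAreaMultiRect rectangles) := by unfold Pre_intersectionAreaMultiRect; infer_instance

def pvWitness_intersectionAreaMultiRect : (List ((Int × Int) × (Int × Int))) :=
  [((0, 0), (4, 3)), ((1, 1), (5, 5))]

def Spec_intersectionAreaMultiRect (rectangles : List ((Int × Int) × (Int × Int))) (out : Int) : Prop := out = intersectionAreaMultiRect_alt rectangles
instance (rectangles : List ((Int × Int) × (Int × Int))) (out : Int) : Decidable (Spec_intersectionAreaMultiRect rectangles out) := by unfold Spec_intersectionAreaMultiRect; infer_instance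

-- ===== CLAIM (what is proved, stated in full; the proofs are below) =====
def Claim_equal_intersectionAreaMultiRect : Prop := ∀ (rectangles : List ((Int × Int) × (Int × Int))), Dom_intersectionAreaMultiRect rectangles → Pre_intersectionAreaMultiRect rectangles → Spec_intersectionAreaMultiRect rectangles (intersectionAreaMultiRect rectangles)

-- ===== LEMMAS AND PROOFS =====

theorem le_foldl_max (f : ((Int × Int) × (Int × Int)) → Int) :
    ∀ (xs : List ((Int × Int) × (Int × Int))) (a : Int),
      a ≤ xs.foldl (fun b q => max b (f q)) a
  | [], a => le_refl a
  | x :: xs, a => le_trans (le_max_left a (f x)) (le_foldl_max f xs (max a (f x)))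

theorem foldl_min_le (f : ((Int × Int) × (Int × Int)) → Int) :
    ∀ (xs : List ((Int × Int) × (Int × Int))) (a : Int),
      xs.foldl (fun b q => min b (f q)) a ≤ a
  | [], a => le_refl a
  | x :: xs, a => le_trans (foldl_min_le f xs (min a (f x))) (min_le_left a (f x))

-- main invariant: A's fold from a valid accumulator equals B's aggregate check
theorem goA_eq_agg : ∀ (rest : List ((Int × Int) × (Int × Int)))
    (x1 y1 x2 y2 : Int), x1 < x2 → y1 < y2 →
    iamrGoA ((x1, y1), (x2, y2)) rest =
      (let left := rest.foldl (fun a q => max a q.1.1) x1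
       let bottom := rest.foldl (fun a q => max a q.1.2) y1
       let right := rest.foldl (fun a q => min a q.2.1) x2
       let top := rest.foldl (fun a q => min a q.2.2) y2
       if left < right ∧ bottom < top then (right - left) * (top - bottom) else 0) := by
  intro rest
  induction rest with
  | nil =>
    intro x1 y1 x2 y2 hx hy
    simp only [iamrGoA, List.foldl]
    rw [if_pos ⟨hx, hy⟩]
  | cons q rest ih =>
    intro x1 y1 x2 y2 hx hy
    obtain ⟨⟨x3, y3⟩, x4, y4⟩ := q
    simp only [iamrGoA, List.foldl]
    by_cases h : max x1 x3 < min x2 x4 ∧ max y1 y3 < min y2 y4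
    · rw [if_pos h]
      exact ih (max x1 x3) (max y1 y3) (min x2 x4) (min y2 y4) h.1 h.2
    · rw [if_neg h]
      -- the global aggregate is also empty: final left ≥ start left, etc.
      have hL := le_foldl_max (fun q => q.1.1) rest (max x1 x3)
      have hB := le_foldl_max (fun q => q.1.2) rest (max y1 y3)
      have hR := foldl_min_le (fun q => q.2.1) rest (min x2 x4)
      have hT := foldl_min_le (fun q => q.2.2) rest (min y2 y4)
      simp only [not_and_or, not_lt] at h
      rw [if_neg]
      simp only [not_and_or, not_lt]
      rcases h with h | h
      · exact Or.inl (le_trans hR (le_trans h hL))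
      · exact Or.inr (le_trans hT (le_trans h hB))

-- ===== VERDICT (by name: the statement is the Claim_ definition above) =====
theorem intersectionAreaMultiRect_spec : Claim_equal_intersectionAreaMultiRect := by
  intro rectangles _ hpre
  unfold Spec_intersectionAreaMultiRect
  cases rectangles with
  | nil => rfl
  | cons r rest =>
    obtain ⟨⟨x1, y1⟩, x2, y2⟩ := r
    unfold Pre_intersectionAreaMultiRect at hpre
    simp [List.all_cons] at hpre
    simpa [intersectionAreaMultiRect, intersectionAreaMultiRect_alt] using
      goA_eq_agg rest x1 y1 x2 y2 hpre.1.1 hpre.1.2
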